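-- pv_equiv track=rewrite | github.com/michaelmulley/openparliament | parliament/core/utils.py | int64_encode
-- ===== SOURCE A (Python) =====
-- import string
--
-- ALPHABET = string.ascii_uppercase + string.ascii_lowercase + \
--            string.digits + '-_'
--
-- BASE = len(ALPHABET)
--
-- SIGN_CHARACTER = '$'
--
-- def int64_encode(n):
--     """Given integer n, returns a base64-ish string representation."""
--     if n < 0:
--         return SIGN_CHARACTER + int64_encode(-n)
--     s = []
--     while True:
--         n, r = divmod(n, BASE)
--         s.append(ALPHABET[r])
--         if n == 0: break
--     return ''.join(reversed(s))
-- ===== SOURCE B (Python) =====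
-- import string
--
-- ALPHABET = string.ascii_uppercase + string.ascii_lowercase + \
--            string.digits + '-_'
--
-- BASE = len(ALPHABET)
--
-- SIGN_CHARACTER = '$'
--
-- def int64_encode(n):
--     """Given integer n, returns a base64-ish string representation."""
--     if n < 0:
--         return SIGN_CHARACTER + int64_encode(-n)
--     return (int64_encode(n // BASE) if n >= BASE else '') + ALPHABET[n % BASE]
-- ===== Notes on version B (the rewrite author's own statement) =====
-- stated objective: simpler
-- what changed: Replaced the explicit digit-accumulator loop plus reversed()/join with a direct recursion on the quotient that emits digits most-significant-first, removing the list and the reversal.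
import Mathlib
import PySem

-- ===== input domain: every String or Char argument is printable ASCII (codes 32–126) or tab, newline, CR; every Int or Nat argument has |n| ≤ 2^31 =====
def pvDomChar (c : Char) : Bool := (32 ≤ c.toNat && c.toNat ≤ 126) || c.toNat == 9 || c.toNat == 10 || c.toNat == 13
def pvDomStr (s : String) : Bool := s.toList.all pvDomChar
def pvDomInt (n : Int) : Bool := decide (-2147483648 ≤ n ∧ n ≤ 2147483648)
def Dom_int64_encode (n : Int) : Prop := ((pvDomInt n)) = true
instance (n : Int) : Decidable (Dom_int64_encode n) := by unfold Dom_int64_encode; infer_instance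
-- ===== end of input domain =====

-- B replaces A's append-then-reverse digit loop by direct recursion on the quotient (simpler).

-- ===== PORT A =====
-- ALPHABET as a list of characters; BASE = 64.
def pvAlph : List Char :=
  "ABCDEFGHIJKLMNOPQRSTUVWXYZabcdefghijklmnopqrstuvwxyz0123456789-_".toList

-- A's while-loop. A only enters the loop with n ≥ 0, so the loop state is carried as a
-- Nat (divmod on a nonnegative int by 64 is Nat division/mod, PySem.Int.floordiv_natCast).
-- ALPHABET[r] with 0 ≤ r < 64 is always in range, so getD never takes its default.
def pvLoopA (n : Nat) (s : List Char) : List Char :=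
  let q := n / 64
  let r := n % 64
  let s' := s ++ [pvAlph.getD r ' ']
  if q = 0 then s' else pvLoopA q s'
termination_by n
decreasing_by rename_i h; omega

def int64_encode (n : Int) : String :=
  if n < 0 then "$" ++ int64_encode (-n)
  else String.mk ((pvLoopA n.toNat []).reverse)
termination_by (if n < 0 then 1 else 0)
decreasing_by simp_all; omega

-- ===== PORT B =====
-- B's recursion on the quotient, on the nonnegative branch (n ≥ 0 there, carried as Nat).
def pvDigitsB (n : Nat) : List Char :=
  (if 64 ≤ n then pvDigitsB (n / 64) else []) ++ [pvAlph.getD (n % 64) ' ']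
termination_by n
decreasing_by exact Nat.div_lt_self (by omega) (by omega)

def int64_encode_alt (n : Int) : String :=
  if n < 0 then "$" ++ int64_encode_alt (-n)
  else String.mk (pvDigitsB n.toNat)
termination_by (if n < 0 then 1 else 0)
decreasing_by simp_all; omega

-- ===== PRECONDITION & SPEC =====
def Spec_int64_encode (n : Int) (out : String) : Prop := out = int64_encode_alt n
instance (n : Int) (out : String) : Decidable (Spec_int64_encode n out) := by unfold Spec_int64_encode; infer_instance

-- ===== CLAIM (what is proved, stated in full; the proofs are below) =====
def Claim_equal_int64_encode : Prop := ∀ (n : Int), Dom_int64_encode n → Spec_int64_encode n (int64_encode n)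

-- ===== LEMMAS AND PROOFS =====

lemma pvLoopA_append (n : Nat) (s : List Char) : pvLoopA n s = s ++ pvLoopA n [] := by
  induction n using Nat.strong_induction_on generalizing s with
  | _ n ih =>
    rw [pvLoopA.eq_def, pvLoopA.eq_def (n := n) (s := [])]
    by_cases h : n / 64 = 0
    · simp [h]
    · have hlt : n / 64 < n := by omega
      simp only [h, if_false]
      rw [ih _ hlt, ih _ hlt ([] ++ [pvAlph.getD (n % 64) ' '])]
      simp

lemma pvLoopA_rev (n : Nat) : (pvLoopA n []).reverse = pvDigitsB n := by
  induction n using Nat.strong_induction_on with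
  | _ n ih =>
    rw [pvLoopA.eq_def, pvDigitsB.eq_def]
    by_cases h : n / 64 = 0
    · have h64 : ¬ 64 ≤ n := by omega
      simp [h, h64]
    · have hlt : n / 64 < n := by omega
      have h64 : 64 ≤ n := by omega
      simp only [h, if_false, h64, if_true]
      rw [pvLoopA_append, List.reverse_append, ih _ hlt]
      simp

lemma enc_nonneg (n : Int) (h : ¬ n < 0) : int64_encode n = int64_encode_alt n := by
  rw [int64_encode, int64_encode_alt]
  simp [h, pvLoopA_rev]

-- ===== VERDICT (by name: the statement is the Claim_ definition above) =====
theorem int64_encode_spec : Claim_equal_int64_encode := by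
  intro n _
  unfold Spec_int64_encode
  by_cases h : n < 0
  · rw [int64_encode, int64_encode_alt]
    simp only [h, if_true]
    rw [enc_nonneg (-n) (by omega)]
  · exact enc_nonneg n h
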